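-- pv_equiv track=rewrite | github.com/georgtonramos/siteloto | app.py | contar_pares_impares_primos_fibonacci_multiplos3
-- ===== SOURCE A (Python) =====
-- def is_fibonacci(n):
--     """Verifica se um número é um número de Fibonacci."""
--     if n < 0:
--         return False
--     if n <= 1:
--         return True
--     a, b = 0, 1
--     while b < n:
--         a, b = b, a + b
--     return b == n
--
-- def contar_pares_impares_primos_fibonacci_multiplos3(numeros):
--     """Conta os números pares, ímpares, primos, Fibonacci, múltiplos de 3 e soma."""
--     pares = 0
--     impares = 0
--     primos = 0
--     fibonacci_nums = 0
--     multiplos3 = 0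
--     soma = 0
--
--     for numero in numeros:
--         soma += numero
--
--         if numero % 2 == 0:
--             pares += 1
--         else:
--             impares += 1
--
--         if numero > 1:
--             is_primo = True
--             for i in range(2, int(numero**0.5) + 1):
--                 if numero % i == 0:
--                     is_primo = False
--                     break
--             if is_primo:
--                 primos += 1
--
--         if is_fibonacci(numero):
--             fibonacci_nums += 1
--
--         if numero % 3 == 0:
--             multiplos3 += 1
--
--     return {
--         "pares": pares,
--         "impares": impares,
--         "primos": primos,
--         "fibonacci": fibonacci_nums,
--         "multiplos3": multiplos3,
--         "soma": soma
--     }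
-- ===== SOURCE B (Python) =====
-- def is_fibonacci(n):
--     """Verifica se um número é um número de Fibonacci."""
--     if n < 0:
--         return False
--     if n <= 1:
--         return True
--     a, b = 0, 1
--     while b < n:
--         a, b = b, a + b
--     return b == n
--
-- def is_primo(n):
--     if n <= 1:
--         return False
--     for i in range(2, int(n**0.5) + 1):
--         if n % i == 0:
--             return False
--     return True
--
-- def contar_pares_impares_primos_fibonacci_multiplos3(numeros):
--     """Conta os números pares, ímpares, primos, Fibonacci, múltiplos de 3 e soma."""
--     return {
--         "pares": sum(1 for x in numeros if x % 2 == 0),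
--         "impares": sum(1 for x in numeros if x % 2 != 0),
--         "primos": sum(1 for x in numeros if is_primo(x)),
--         "fibonacci": sum(1 for x in numeros if is_fibonacci(x)),
--         "multiplos3": sum(1 for x in numeros if x % 3 == 0),
--         "soma": sum(numeros),
--     }
-- ===== Notes on version B (the rewrite author's own statement) =====
-- stated objective: simpler
-- what changed: Replaces the single six-accumulator loop with an is_primo helper and six independent one-line comprehension passes (one per counter plus sum).
import Mathlib
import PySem

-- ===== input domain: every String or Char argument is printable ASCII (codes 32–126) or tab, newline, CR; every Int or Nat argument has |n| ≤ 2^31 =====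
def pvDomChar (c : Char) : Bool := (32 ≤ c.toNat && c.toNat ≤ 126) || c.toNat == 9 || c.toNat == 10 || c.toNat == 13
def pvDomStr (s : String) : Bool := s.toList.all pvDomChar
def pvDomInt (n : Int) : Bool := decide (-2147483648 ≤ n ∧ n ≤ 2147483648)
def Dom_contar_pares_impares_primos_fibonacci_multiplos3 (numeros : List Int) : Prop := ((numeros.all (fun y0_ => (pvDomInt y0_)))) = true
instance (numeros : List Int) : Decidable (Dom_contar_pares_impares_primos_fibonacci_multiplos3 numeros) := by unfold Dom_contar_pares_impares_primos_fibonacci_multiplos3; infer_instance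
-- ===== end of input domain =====

-- B replaces A's single six-accumulator loop with an is_primo helper and six independent one-pass counts/sum (simpler decomposition, same cost).

-- ===== PORT A =====

-- port of `int(numero**0.5)`; Nat.sqrt equals Python's int(n**0.5) exactly for 0 ≤ n ≤ 2^31 (double sqrt is exact enough there)
def pvIsqrt (n : Int) : Int := Int.ofNat n.toNat.sqrt

-- `while b < n: a, b = b, a+b; return b == n` — fuel-bounded loop; fuel 2*n+3 always suffices (a+b strictly increases)
def pvFibLoop (fuel : Nat) (n a b : Int) : Bool :=
  match fuel with
  | 0 => false
  | fuel + 1 => if b < n then pvFibLoop fuel n b (a + b) else b == n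

def is_fibonacci (n : Int) : Bool :=
  if n < 0 then false
  else if n ≤ 1 then true
  else pvFibLoop (2 * n).toNat n 0 1

def contar_pares_impares_primos_fibonacci_multiplos3 (numeros : List Int) : List (String × Int) :=
  let st := numeros.foldl
    (fun (st : Int × Int × Int × Int × Int × Int) numero =>
      let (pares, impares, primos, fib, m3, soma) := st
      let soma := soma + numero
      let (pares, impares) :=
        if PySem.Int.mod numero 2 == 0 then (pares + 1, impares) else (pares, impares + 1)
      let primos :=
        if numero > 1 then
          -- loop `for i in range(2, int(sqrt)+1): if n % i == 0: is_primo = False; break`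
          if (PySem.List.pyRange 2 (pvIsqrt numero + 1) 1).all
               (fun i => !(PySem.Int.mod numero i == 0)) then primos + 1 else primos
        else primos
      let fib := if is_fibonacci numero then fib + 1 else fib
      let m3 := if PySem.Int.mod numero 3 == 0 then m3 + 1 else m3
      (pares, impares, primos, fib, m3, soma))
    (0, 0, 0, 0, 0, 0)
  [("pares", st.1), ("impares", st.2.1), ("primos", st.2.2.1),
   ("fibonacci", st.2.2.2.1), ("multiplos3", st.2.2.2.2.1), ("soma", st.2.2.2.2.2)]

-- ===== PORT B =====

def is_primo (n : Int) : Bool :=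
  if n ≤ 1 then false
  else (PySem.List.pyRange 2 (pvIsqrt n + 1) 1).all (fun i => !(PySem.Int.mod n i == 0))

def contar_pares_impares_primos_fibonacci_multiplos3_alt (numeros : List Int) : List (String × Int) :=
  [("pares", (numeros.countP (fun x => PySem.Int.mod x 2 == 0) : Int)),
   ("impares", (numeros.countP (fun x => !(PySem.Int.mod x 2 == 0)) : Int)),
   ("primos", (numeros.countP is_primo : Int)),
   ("fibonacci", (numeros.countP is_fibonacci : Int)),
   ("multiplos3", (numeros.countP (fun x => PySem.Int.mod x 3 == 0) : Int)),
   ("soma", numeros.sum)]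

-- ===== PRECONDITION & SPEC =====
def Spec_contar_pares_impares_primos_fibonacci_multiplos3 (numeros : List Int) (out : List (String × Int)) : Prop := out = contar_pares_impares_primos_fibonacci_multiplos3_alt numeros
instance (numeros : List Int) (out : List (String × Int)) : Decidable (Spec_contar_pares_impares_primos_fibonacci_multiplos3 numeros out) := by unfold Spec_contar_pares_impares_primos_fibonacci_multiplos3; infer_instance

-- ===== CLAIM (what is proved, stated in full; the proofs are below) =====
def Claim_equal_contar_pares_impares_primos_fibonacci_multiplos3 : Prop := ∀ (numeros : List Int), Dom_contar_pares_impares_primos_fibonacci_multiplos3 numeros → Spec_contar_pares_impares_primos_fibonacci_multiplos3 numeros (contar_pares_impares_primos_fibonacci_multiplos3 numeros)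

-- ===== LEMMAS AND PROOFS =====

-- loop invariant: A's fold equals B's six independent counts, offset by the accumulators
theorem loop_eq (numeros : List Int) (p i pr f m s : Int) :
    numeros.foldl
      (fun (st : Int × Int × Int × Int × Int × Int) numero =>
        let (pares, impares, primos, fib, m3, soma) := st
        let soma := soma + numero
        let (pares, impares) :=
          if PySem.Int.mod numero 2 == 0 then (pares + 1, impares) else (pares, impares + 1)
        let primos :=
          if numero > 1 then
            if (PySem.List.pyRange 2 (pvIsqrt numero + 1) 1).all
                 (fun i => !(PySem.Int.mod numero i == 0)) then primos + 1 else primos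
          else primos
        let fib := if is_fibonacci numero then fib + 1 else fib
        let m3 := if PySem.Int.mod numero 3 == 0 then m3 + 1 else m3
        (pares, impares, primos, fib, m3, soma))
      (p, i, pr, f, m, s)
    = (p + (numeros.countP (fun x => PySem.Int.mod x 2 == 0) : Int),
       i + (numeros.countP (fun x => !(PySem.Int.mod x 2 == 0)) : Int),
       pr + (numeros.countP is_primo : Int),
       f + (numeros.countP is_fibonacci : Int),
       m + (numeros.countP (fun x => PySem.Int.mod x 3 == 0) : Int),
       s + numeros.sum) := by
  induction numeros generalizing p i pr f m s with
  | nil => simp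
  | cons x xs ih =>
    simp only [List.foldl_cons, List.countP_cons, List.sum_cons]
    by_cases h1 : x ≤ 1 <;>
    by_cases hall : ((PySem.List.pyRange 2 (pvIsqrt x + 1) 1).all
        (fun i => !(PySem.Int.mod x i == 0))) = true <;>
    by_cases h2 : (PySem.Int.mod x 2 == 0) = true <;>
    by_cases hf : is_fibonacci x = true <;>
    by_cases h3 : (PySem.Int.mod x 3 == 0) = true <;>
      simp_all only [is_primo, not_le, Bool.not_eq_true, Bool.false_eq_true,
        gt_iff_lt, if_pos, if_neg, not_lt, if_false] <;>
      · simp only [Bool.not_true, Bool.not_false, if_true, if_false,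
          Bool.false_eq_true, Nat.add_zero, Prod.mk.injEq]
        push_cast
        and_intros <;> first | trivial | omega

theorem contar_spec_aux (numeros : List Int) :
    contar_pares_impares_primos_fibonacci_multiplos3 numeros
      = contar_pares_impares_primos_fibonacci_multiplos3_alt numeros := by
  unfold contar_pares_impares_primos_fibonacci_multiplos3
        contar_pares_impares_primos_fibonacci_multiplos3_alt
  rw [loop_eq]
  simp

-- ===== VERDICT (by name: the statement is the Claim_ definition above) =====
theorem contar_pares_impares_primos_fibonacci_multiplos3_spec : Claim_equal_contar_pares_impares_primos_fibonacci_multiplos3 := by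
  intro numeros _
  unfold Spec_contar_pares_impares_primos_fibonacci_multiplos3
  exact contar_spec_aux numeros
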